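-- pv_equiv track=rewrite | github.com/tokheim/aoc | 2024/day_9.py | free_space_idxs
-- ===== SOURCE A (Python) =====
-- def free_space_idxs(mem_line):
--     cur_idx = 0
--     for i, size in enumerate(mem_line):
--         if i % 2 == 0:
--             cur_idx += size
--             continue
--         for n in range(size):
--             yield n+cur_idx
--         cur_idx += size
-- ===== SOURCE B (Python) =====
-- def free_space_idxs(mem_line):
--     # Two-pass decomposition: build a prefix-sum table of segment end offsets,
--     # then emit the absolute index range of each odd (free-space) segment.
--     offsets = []
--     total = 0
--     for size in mem_line:
--         total += size
--         offsets.append(total)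
--     for i in range(1, len(mem_line), 2):
--         yield from range(offsets[i] - mem_line[i], offsets[i])
-- ===== Notes on version B (the rewrite author's own statement) =====
-- stated objective: alternative
-- what changed: Replaces the single enumerate loop threading cur_idx with a parity branch by a two-pass scheme: a prefix-sum offsets table built first, then a separate emission pass over only the odd indices yielding range(offsets[i]-mem_line[i], offsets[i]).
import Mathlib
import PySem

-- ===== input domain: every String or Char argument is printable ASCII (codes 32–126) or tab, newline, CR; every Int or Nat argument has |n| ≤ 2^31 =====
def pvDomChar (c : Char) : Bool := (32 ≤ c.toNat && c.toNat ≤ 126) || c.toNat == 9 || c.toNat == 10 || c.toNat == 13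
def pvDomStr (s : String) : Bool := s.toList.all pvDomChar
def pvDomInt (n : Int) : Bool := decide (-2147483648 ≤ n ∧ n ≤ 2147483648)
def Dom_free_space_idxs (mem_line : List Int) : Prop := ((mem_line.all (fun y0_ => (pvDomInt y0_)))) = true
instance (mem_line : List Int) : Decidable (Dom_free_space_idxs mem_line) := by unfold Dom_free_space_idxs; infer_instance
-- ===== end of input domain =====

-- B replaces A's single enumerate loop (threading cur_idx with a parity branch) by a
-- two-pass decomposition: a prefix-sum offsets table, then an emission pass over odd indices.

-- ===== PORT A =====
-- generator fold: state = (cur_idx, yielded list); even index adds size, odd index yields range(size) shifted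
def free_space_idxs (mem_line : List Int) : List Int :=
  ((PySem.List.enumerate mem_line 0).foldl
    (fun (st : Int × List Int) (p : Int × Int) =>
      if PySem.Int.mod p.1 2 = 0 then (st.1 + p.2, st.2)
      else (st.1 + p.2, st.2 ++ (PySem.List.pyRange 0 p.2 1).map (fun n => n + st.1)))
    (0, [])).2

-- ===== PORT B =====
-- pass 1: prefix-sum offsets table; pass 2: for odd i yield range(offsets[i]-mem_line[i], offsets[i])
def free_space_idxs_alt (mem_line : List Int) : List Int :=
  let offsets := (mem_line.foldl
    (fun (st : Int × List Int) (size : Int) => (st.1 + size, st.2 ++ [st.1 + size]))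
    (0, [])).2
  (PySem.List.pyRange 1 (mem_line.length : Int) 2).foldl
    (fun (acc : List Int) (i : Int) =>
      acc ++ PySem.List.pyRange
        (PySem.List.pyGetD offsets i 0 - PySem.List.pyGetD mem_line i 0)
        (PySem.List.pyGetD offsets i 0) 1)
    []

-- ===== PRECONDITION & SPEC =====
def Spec_free_space_idxs (mem_line : List Int) (out : List Int) : Prop := out = free_space_idxs_alt mem_line
instance (mem_line : List Int) (out : List Int) : Decidable (Spec_free_space_idxs mem_line out) := by unfold Spec_free_space_idxs; infer_instance

-- ===== CLAIM (what is proved, stated in full; the proofs are below) =====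
def Claim_equal_free_space_idxs : Prop := ∀ (mem_line : List Int), Dom_free_space_idxs mem_line → Spec_free_space_idxs mem_line (free_space_idxs mem_line)

-- ===== LEMMAS AND PROOFS =====

-- common reference: per free-space pair, the emitted absolute index range
def pairsSpec : Int → List Int → List Int
  | _, [] => []
  | _, [_] => []
  | cur, a :: b :: rest => PySem.List.pyRange (cur + a) (cur + a + b) 1 ++ pairsSpec (cur + a + b) rest

def prefixList : Int → List Int → List Int
  | _, [] => []
  | c, a :: r => (c + a) :: prefixList (c + a) r

lemma mapRange (c b : Int) :
    (PySem.List.pyRange 0 b 1).map (fun n => n + c) = PySem.List.pyRange c (c + b) 1 := by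
  simp only [PySem.List.pyRange_one, List.map_map]
  have h : c + b - c = b := by ring
  rw [h, sub_zero]
  apply List.map_congr_left
  intro k _
  simp only [Function.comp_apply]
  omega

lemma A_go (l : List Int) (s cur : Int) (acc : List Int) (hs : s % 2 = 0) :
    ((PySem.List.enumerate l s).foldl
      (fun (st : Int × List Int) (p : Int × Int) =>
        if PySem.Int.mod p.1 2 = 0 then (st.1 + p.2, st.2)
        else (st.1 + p.2, st.2 ++ (PySem.List.pyRange 0 p.2 1).map (fun n => n + st.1)))
      (cur, acc)).2 = acc ++ pairsSpec cur l := by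
  induction cur, l using pairsSpec.induct generalizing s acc with
  | case1 cur => simp [PySem.List.enumerate, pairsSpec]
  | case2 cur a =>
      simp only [PySem.List.enumerate, List.foldl_cons, List.foldl_nil]
      rw [if_pos (by rw [PySem.Int.mod_eq_emod_of_pos (by norm_num)]; omega)]
      simp [pairsSpec]
  | case3 cur a b rest ih =>
      have h1 : PySem.Int.mod s 2 = 0 := by
        rw [PySem.Int.mod_eq_emod_of_pos (by norm_num)]; omega
      have h2 : ¬ PySem.Int.mod (s + 1) 2 = 0 := by
        rw [PySem.Int.mod_eq_emod_of_pos (by norm_num)]; omega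
      simp only [PySem.List.enumerate_cons, List.foldl_cons, h1, h2, if_true, if_false]
      rw [ih (s + 1 + 1) _ (by omega)]
      rw [mapRange]
      simp [pairsSpec, List.append_assoc]

lemma prefix_fold (l : List Int) (c : Int) (acc : List Int) :
    (l.foldl (fun (st : Int × List Int) (size : Int) => (st.1 + size, st.2 ++ [st.1 + size]))
      (c, acc)).2 = acc ++ prefixList c l := by
  induction l generalizing c acc with
  | nil => simp [prefixList]
  | cons a r ih => simp [List.foldl_cons, ih, prefixList]

lemma pyRangeOdd (n : Nat) :
    PySem.List.pyRange 1 (n : Int) 2 = (List.range (n / 2)).map (fun (k : Nat) => 1 + 2 * (k : Int)) := by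
  rw [PySem.List.pyRange_of_pos _ _ (by norm_num)]
  have h : (if (1 : Int) < (n : Int) then (((n : Int) - 1 + 2 - 1) / 2).toNat else 0) = n / 2 := by
    split_ifs with h <;> omega
  rw [h]

lemma flat_eq_pairs (l : List Int) (c : Int) :
    (List.range (l.length / 2)).flatMap
      (fun k => PySem.List.pyRange
        ((prefixList c l).getD (1 + 2 * k) 0 - l.getD (1 + 2 * k) 0)
        ((prefixList c l).getD (1 + 2 * k) 0) 1)
      = pairsSpec c l := by
  induction c, l using pairsSpec.induct with
  | case1 c => simp [pairsSpec]
  | case2 c a => simp [pairsSpec]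
  | case3 c a b rest ih =>
      have hlen : (a :: b :: rest).length / 2 = rest.length / 2 + 1 := by simp; omega
      rw [hlen, List.range_succ_eq_map, List.flatMap_cons, List.flatMap_map]
      have hhead : c + a + b - b = c + a := by ring
      simp only [pairsSpec]
      have hg0 : (prefixList c (a :: b :: rest)).getD (1 + 2 * 0) 0 = c + a + b := by
        simp [prefixList]
      have hl0 : (a :: b :: rest).getD (1 + 2 * 0) 0 = b := by simp
      rw [hg0, hl0, hhead, ← ih]
      congr 1

lemma B_eq_pairs (l : List Int) : free_space_idxs_alt l = pairsSpec 0 l := by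
  unfold free_space_idxs_alt
  rw [prefix_fold l 0 []]
  rw [PySem.List.foldl_append_eq_flatMap, pyRangeOdd, List.flatMap_map]
  simp only [List.nil_append]
  rw [← flat_eq_pairs l 0]
  apply List.flatMap_congr
  intro k _
  have h1 : (1 + 2 * (k : Int)) = ((1 + 2 * k : Nat) : Int) := by push_cast; ring
  rw [h1]
  simp only [PySem.List.pyGetD_natCast]

-- ===== VERDICT (by name: the statement is the Claim_ definition above) =====
theorem free_space_idxs_spec : Claim_equal_free_space_idxs := by
  intro l _
  unfold Spec_free_space_idxs
  rw [B_eq_pairs]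
  unfold free_space_idxs
  rw [A_go l 0 0 [] (by omega)]
  simp
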